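-- pv_equiv track=rewrite | github.com/NurRus/DS_Bootcamp | day2/ex03/src/first_nest.py | struct_validate
-- ===== SOURCE A (Python) =====
-- def struct_validate(lines, has_header):
--     if has_header:
--         if len(lines) < 2:
--             return False
--         header = lines[0].strip().split(',')
--         if header != ['head','tail']:
--             return False
--         lines = lines[1:]
--
--     for line in lines:
--         parts = line.strip().split(',')
--         if len(parts) != 2:
--             return False
--         if parts[0] not in ['0', '1'] or parts[1] not in ['0', '1']:
--             return False
--         if parts[0] == parts[1]:
--             return False
--     return True
-- ===== SOURCE B (Python) =====
-- VALID = frozenset({'0,1', '1,0'})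
--
-- def struct_validate(lines, has_header):
--     if has_header:
--         if len(lines) < 2 or lines[0].strip() != 'head,tail':
--             return False
--         lines = lines[1:]
--     return all(line.strip() in VALID for line in lines)
-- ===== Notes on version B (the rewrite author's own statement) =====
-- stated objective: simpler
-- what changed: Replaces the split-into-parts plus four-branch per-line validation (and the header split-and-compare) with a single stripped-string lookup in a frozen two-element set of the only acceptable line forms, folded into one all(...) over the body lines.
import Mathlib
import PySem

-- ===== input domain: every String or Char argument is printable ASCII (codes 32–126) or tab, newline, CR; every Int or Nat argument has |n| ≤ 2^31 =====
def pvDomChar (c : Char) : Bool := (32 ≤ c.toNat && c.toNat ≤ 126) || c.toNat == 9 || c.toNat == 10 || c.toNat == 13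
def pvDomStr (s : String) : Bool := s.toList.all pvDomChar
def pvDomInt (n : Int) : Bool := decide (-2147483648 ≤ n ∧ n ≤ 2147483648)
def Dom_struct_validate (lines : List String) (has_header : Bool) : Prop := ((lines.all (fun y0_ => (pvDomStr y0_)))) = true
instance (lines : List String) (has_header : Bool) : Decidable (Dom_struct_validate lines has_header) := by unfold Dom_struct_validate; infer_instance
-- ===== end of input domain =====

-- B replaces A's split-into-parts four-branch per-line validation (and the header split-and-compare)
-- with one membership test of the stripped line in the two-element set {"0,1","1,0"}, folded into all(...) — simpler, same cost.

-- ===== PORT A =====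
-- the 'for line in lines' loop of A; branches in source order
def pvLoopA : List String → Bool
  | [] => true
  | line :: rest =>
      -- parts = line.strip().split(',')  (sep "," nonempty, so Python never raises; Chars.splitOn is that split)
      let parts := PySem.Chars.splitOn (PySem.Str.strip line).toList [',']
      if parts.length ≠ 2 then false
      else if ¬(parts.getD 0 [] = ['0'] ∨ parts.getD 0 [] = ['1']) ∨
              ¬(parts.getD 1 [] = ['0'] ∨ parts.getD 1 [] = ['1']) then false
      else if parts.getD 0 [] = parts.getD 1 [] then false
      else pvLoopA rest

def struct_validate (lines : List String) (has_header : Bool) : Bool :=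
  if has_header then
    if lines.length < 2 then false
    else
      -- lines[0] is in range (length ≥ 2), so getD is exact here
      let header := PySem.Chars.splitOn (PySem.Str.strip (lines.getD 0 "")).toList [',']
      if header ≠ ["head".toList, "tail".toList] then false
      else pvLoopA (PySem.List.slice lines (some 1) none)   -- lines[1:]
  else pvLoopA lines

-- ===== PORT B =====
-- line.strip() in VALID, VALID = {"0,1", "1,0"}
def pvValidLine (line : String) : Bool :=
  (PySem.Str.strip line).toList == "0,1".toList || (PySem.Str.strip line).toList == "1,0".toList

def struct_validate_alt (lines : List String) (has_header : Bool) : Bool :=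
  if has_header then
    if lines.length < 2 || (PySem.Str.strip (lines.getD 0 "")).toList ≠ "head,tail".toList then false
    else (lines.drop 1).all pvValidLine   -- lines[1:], then all(line.strip() in VALID …)
  else lines.all pvValidLine

-- ===== PRECONDITION & SPEC =====
def Spec_struct_validate (lines : List String) (has_header : Bool) (out : Bool) : Prop := out = struct_validate_alt lines has_header
instance (lines : List String) (has_header : Bool) (out : Bool) : Decidable (Spec_struct_validate lines has_header out) := by unfold Spec_struct_validate; infer_instance

-- ===== CLAIM (what is proved, stated in full; the proofs are below) =====
def Claim_equal_struct_validate : Prop := ∀ (lines : List String) (has_header : Bool), Dom_struct_validate lines has_header → Spec_struct_validate lines has_header (struct_validate lines has_header)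

-- ===== LEMMAS AND PROOFS =====

-- glue x ps: prepend x onto the first piece of ps
def pvGlue (x : List Char) : List (List Char) → List (List Char)
  | [] => [x]
  | p :: ps => (x ++ p) :: ps

-- a structural model of s.split(',')
def pvSplit : List Char → List (List Char)
  | [] => [[]]
  | c :: rest => if c = ',' then [] :: pvSplit rest else pvGlue [c] (pvSplit rest)

theorem pvSplit_ne_nil (cs : List Char) : pvSplit cs ≠ [] := by
  cases cs with
  | nil => simp [pvSplit]
  | cons c rest =>
      simp only [pvSplit]
      split
      · simp
      · cases h : pvSplit rest <;> simp [pvGlue]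

theorem pvGlue_nil (ps : List (List Char)) (h : ps ≠ []) : pvGlue [] ps = ps := by
  cases ps with
  | nil => exact absurd rfl h
  | cons p ps => simp [pvGlue]

theorem pvGlue_append (x : List Char) (c : Char) (ps : List (List Char)) :
    pvGlue (x ++ [c]) ps = pvGlue x (pvGlue [c] ps) := by
  cases ps <;> simp [pvGlue]

theorem pvGo_spec (fuel : Nat) (l cur : List Char) (acc : List (List Char))
    (h : l.length ≤ fuel) :
    PySem.Chars.splitOn.go [','] fuel l cur acc = acc.reverse ++ pvGlue cur.reverse (pvSplit l) := by
  induction fuel generalizing l cur acc with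
  | zero =>
      have : l = [] := List.eq_nil_of_length_eq_zero (Nat.le_zero.mp h)
      subst this
      simp [PySem.Chars.splitOn.go, pvSplit, pvGlue]
  | succ fuel ih =>
      cases l with
      | nil => simp [PySem.Chars.splitOn.go, pvSplit, pvGlue]
      | cons c rest =>
          simp only [PySem.Chars.splitOn.go]
          by_cases hc : c = ','
          · subst hc
            rw [if_pos (by simp [List.isPrefixOf])]
            simp only [List.length_cons] at h
            rw [ih (List.drop [','].length (',' :: rest)) [] (cur.reverse :: acc) (by simpa using Nat.le_of_succ_le_succ h)]
            simp only [List.length_singleton, List.drop_succ_cons, List.drop_zero,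
                       List.reverse_cons, List.reverse_nil]
            rw [pvGlue_nil _ (pvSplit_ne_nil rest)]
            simp [pvSplit, pvGlue]
          · rw [if_neg (by simp [List.isPrefixOf]; exact fun h' => hc h'.symm)]
            simp only [List.length_cons] at h
            rw [ih rest (c :: cur) acc (Nat.le_of_succ_le_succ h)]
            simp only [pvSplit, if_neg hc, List.reverse_cons]
            rw [pvGlue_append]

theorem splitOn_eq_pvSplit (cs : List Char) :
    PySem.Chars.splitOn cs [','] = pvSplit cs := by
  show PySem.Chars.splitOn.go [','] (cs.length + 1) cs [] [] = _
  rw [pvGo_spec _ _ _ _ (Nat.le_succ _)]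
  simp [pvGlue_nil _ (pvSplit_ne_nil cs)]

theorem pvSplit_single (cs b : List Char) (hb : ',' ∉ b) :
    pvSplit cs = [b] ↔ cs = b := by
  induction cs generalizing b with
  | nil => simp only [pvSplit]; constructor <;> (intro h; simp_all)
  | cons c rest ih =>
      simp only [pvSplit]
      by_cases hc : c = ','
      · subst hc
        rw [if_pos rfl]
        constructor
        · intro h
          exact absurd (by simpa using congrArg List.tail h) (pvSplit_ne_nil rest)
        · intro h
          exact absurd (h ▸ List.mem_cons_self) hb
      · rw [if_neg hc]
        obtain ⟨p, ps, hps⟩ := List.exists_cons_of_ne_nil (pvSplit_ne_nil rest)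
        rw [hps]
        simp only [pvGlue, List.singleton_append]
        constructor
        · rintro h
          have h1 : b = c :: p := by simpa using (congrArg (List.getD · 0 []) h.symm)
          have h2 : ps = [] := by simpa using congrArg List.tail h
          have : rest = p := by
            rw [← ih p (fun hp => hb (h1 ▸ List.mem_cons_of_mem _ hp)), hps, h2]
          rw [this, ← h1]
        · intro h
          cases b with
          | nil => simp at h
          | cons b0 bs =>
              obtain ⟨hb0, hbs⟩ := List.cons_eq_cons.mp h
              have hbs' : pvSplit rest = [bs] :=
                (ih bs (fun hp => hb (List.mem_cons_of_mem _ hp))).mpr hbs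
              rw [hps] at hbs'
              obtain ⟨hp, hps0⟩ := List.cons_eq_cons.mp hbs'
              rw [hps0, hp, hb0]

theorem pvSplit_pair (cs a b : List Char) (ha : ',' ∉ a) (hb : ',' ∉ b) :
    pvSplit cs = [a, b] ↔ cs = a ++ ',' :: b := by
  induction cs generalizing a with
  | nil =>
      simp only [pvSplit]
      constructor
      · intro h; simp at h
      · intro h; exact absurd h.symm (List.append_ne_nil_of_right_ne_nil _ (by simp))
  | cons c rest ih =>
      simp only [pvSplit]
      by_cases hc : c = ','
      · subst hc
        rw [if_pos rfl]
        constructor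
        · intro h
          obtain ⟨ha0, hb0⟩ := List.cons_eq_cons.mp h
          have : a = [] := by
            cases a with
            | nil => rfl
            | cons a0 as =>
                exact absurd (List.cons_eq_cons.mp h).1.symm (by simp)
          subst this
          simp only [List.nil_append, List.cons.injEq, true_and]
          exact (pvSplit_single rest b hb).mp hb0
        · intro h
          have ha' : a = [] := by
            cases a with
            | nil => rfl
            | cons a0 as =>
                have : a0 = ',' := (List.cons_eq_cons.mp (by simpa using h)).1.symm
                exact absurd (this ▸ List.mem_cons_self) ha
          subst ha'
          have : rest = b := by simpa using h
          rw [(pvSplit_single rest b hb).mpr this]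
      · rw [if_neg hc]
        obtain ⟨p, ps, hps⟩ := List.exists_cons_of_ne_nil (pvSplit_ne_nil rest)
        rw [hps]
        simp only [pvGlue, List.singleton_append]
        constructor
        · intro h
          obtain ⟨h1, h2⟩ := List.cons_eq_cons.mp h
          have hcs : a = c :: (a.tail) := by rw [← h1]; rfl
          have hta : ',' ∉ a.tail := fun hm => ha (hcs ▸ List.mem_cons_of_mem _ hm)
          have : pvSplit rest = [a.tail, b] := by rw [hps, h2, ← h1]; simp
          have hrest := (ih a.tail hta).mp this
          rw [hcs, hrest]; rfl
        · intro h
          cases a with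
          | nil =>
              have h' : c :: rest = ',' :: b := by simpa using h
              exact absurd (List.cons_eq_cons.mp h').1 hc
          | cons a0 as =>
              have h' : c :: rest = a0 :: (as ++ ',' :: b) := by simpa using h
              obtain ⟨h1, h2⟩ := List.cons_eq_cons.mp h'
              have has : ',' ∉ as := fun hm => ha (List.mem_cons_of_mem _ hm)
              have := (ih as has).mpr h2
              rw [hps] at this
              obtain ⟨hp, hps0⟩ := List.cons_eq_cons.mp this
              rw [hps0, hp, h1]

-- the branch chain of A's loop body, over arbitrary parts, with continuation k
def pvChain (parts : List (List Char)) (k : Bool) : Bool :=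
  if parts.length ≠ 2 then false
  else if ¬(parts.getD 0 [] = ['0'] ∨ parts.getD 0 [] = ['1']) ∨
          ¬(parts.getD 1 [] = ['0'] ∨ parts.getD 1 [] = ['1']) then false
  else if parts.getD 0 [] = parts.getD 1 [] then false
  else k

theorem pvChain_eq (parts : List (List Char)) (k : Bool) :
    pvChain parts k = (decide (parts = [['0'], ['1']] ∨ parts = [['1'], ['0']]) && k) := by
  match parts with
  | [] => simp [pvChain]
  | [a] => simp [pvChain]
  | a :: b :: c :: rest => simp [pvChain]
  | [a, b] =>
      simp only [pvChain, List.length_cons, List.length_nil, List.getD_cons_zero,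
                 List.getD_cons_succ]
      rw [if_neg (by simp)]
      split_ifs with h1 h2
      · simp_all
        rintro (⟨ha, hb⟩ | ⟨ha, hb⟩) <;> subst ha <;> subst hb <;> simp_all
      · simp_all
      · push_neg at h1
        rcases h1.1 with ha | ha <;> rcases h1.2 with hb | hb <;> subst ha <;> subst hb <;> simp_all

theorem valid_iff (line : String) :
    pvValidLine line = true ↔
      pvSplit (PySem.Str.strip line).toList = [['0'], ['1']] ∨
      pvSplit (PySem.Str.strip line).toList = [['1'], ['0']] := by
  unfold pvValidLine
  rw [Bool.or_eq_true, beq_iff_eq, beq_iff_eq]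
  constructor
  · rintro (h | h)
    · exact Or.inl ((pvSplit_pair _ ['0'] ['1'] (by decide) (by decide)).mpr (by simpa using h))
    · exact Or.inr ((pvSplit_pair _ ['1'] ['0'] (by decide) (by decide)).mpr (by simpa using h))
  · rintro (h | h)
    · exact Or.inl (by simpa using (pvSplit_pair _ ['0'] ['1'] (by decide) (by decide)).mp h)
    · exact Or.inr (by simpa using (pvSplit_pair _ ['1'] ['0'] (by decide) (by decide)).mp h)

set_option maxHeartbeats 1000000 in
theorem loopA_eq_all (ls : List String) : pvLoopA ls = ls.all pvValidLine := by
  induction ls with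
  | nil => rfl
  | cons line rest ih =>
      have hchain : pvLoopA (line :: rest) =
          pvChain (PySem.Chars.splitOn (PySem.Str.strip line).toList [',']) (pvLoopA rest) := by
        rw [pvLoopA, pvChain]
      rw [hchain, pvChain_eq, splitOn_eq_pvSplit, List.all_cons, ih]
      congr 1
      rw [Bool.eq_iff_iff, decide_eq_true_iff, ← valid_iff]

theorem header_eq (s : String) :
    PySem.Chars.splitOn (PySem.Str.strip s).toList [','] = ["head".toList, "tail".toList] ↔
      (PySem.Str.strip s).toList = "head,tail".toList := by
  rw [splitOn_eq_pvSplit]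
  exact (pvSplit_pair _ "head".toList "tail".toList (by decide) (by decide)).trans (by simp)

-- ===== VERDICT (by name: the statement is the Claim_ definition above) =====
theorem struct_validate_spec : Claim_equal_struct_validate := by
  intro lines has_header _
  unfold Spec_struct_validate struct_validate struct_validate_alt
  cases has_header with
  | false => simpa using loopA_eq_all lines
  | true =>
      simp only [if_true]
      by_cases hlen : lines.length < 2
      · simp [hlen]
      · rw [if_neg hlen]
        simp only [hlen, decide_false, Bool.false_or]
        by_cases hh : (PySem.Str.strip (lines.getD 0 "")).toList = "head,tail".toList
        · rw [if_neg (by simpa using (header_eq (lines.getD 0 "")).mpr hh), if_neg (by simpa using hh)]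
          rw [PySem.List.slice_from lines (by norm_num)]
          simpa using loopA_eq_all (lines.drop 1)
        · rw [if_pos (by simpa using fun hc => hh ((header_eq (lines.getD 0 "")).mp hc)),
              if_pos (by simpa using hh)]
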